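-- pv_equiv track=rewrite | github.com/Samyu0304/thought-propagation | creative-writing/tasks/text.py | plan_output_warp
-- ===== SOURCE A (Python) =====
-- def plan_output_warp(plans: str) -> str:
--     # 1. 2. 3. 4.
--     plan_1, plan_2, plan_3, plan_4 = '', '', '', ''
--     plans = plans.split('\n')
--     for plan in plans:
--         if not plan.endswith('\n'):
--             plan = plan + '\n'
--         if plan.startswith('1.'):
--             plan_1 = plan
--         elif plan.startswith('2.'):
--             plan_2 = plan
--         elif plan.startswith('3.'):
--             plan_3 = plan
--         elif plan.startswith('4.'):
--             plan_4 = plan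
--     plan_string = 'Plan:\n' + plan_1 +  plan_2 + plan_3 + plan_4
--
--     return plan_string
-- ===== SOURCE B (Python) =====
-- def plan_output_warp(plans: str) -> str:
--     lines = [l + '\n' for l in plans.split('\n')]
--     out = 'Plan:\n'
--     for prefix in ('1.', '2.', '3.', '4.'):
--         matches = [l for l in lines if l.startswith(prefix)]
--         out += matches[-1] if matches else ''
--     return out
-- ===== Notes on version B (the rewrite author's own statement) =====
-- stated objective: alternative
-- what changed: Replaces A's single categorizing pass holding four mutable slots with four targeted per-prefix scans that each keep the last line starting with that prefix.
import Mathlib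
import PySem

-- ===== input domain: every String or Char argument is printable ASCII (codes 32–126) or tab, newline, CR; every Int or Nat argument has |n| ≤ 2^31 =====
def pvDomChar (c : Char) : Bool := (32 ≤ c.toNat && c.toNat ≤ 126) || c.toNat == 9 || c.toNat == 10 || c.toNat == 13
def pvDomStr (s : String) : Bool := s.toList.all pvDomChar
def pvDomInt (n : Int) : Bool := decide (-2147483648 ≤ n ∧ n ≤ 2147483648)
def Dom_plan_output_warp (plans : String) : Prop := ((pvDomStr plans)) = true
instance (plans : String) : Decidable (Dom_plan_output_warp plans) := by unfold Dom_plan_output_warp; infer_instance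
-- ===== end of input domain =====

-- B replaces A's single categorizing pass with four per-prefix scans keeping the last match; same cost, different decomposition (return value only; no mutation involved).

-- ===== PORT A =====
-- A's loop body: append '\n' if missing, then the if/elif chain updating one of the four slots.
def pvStepA (st : List Char × List Char × List Char × List Char) (plan : List Char) :
    List Char × List Char × List Char × List Char :=
  let pl := if PySem.Chars.endswith plan ['\n'] then plan else plan ++ ['\n']
  if PySem.Chars.startswith pl ['1', '.'] then (pl, st.2.1, st.2.2.1, st.2.2.2)
  else if PySem.Chars.startswith pl ['2', '.'] then (st.1, pl, st.2.2.1, st.2.2.2)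
  else if PySem.Chars.startswith pl ['3', '.'] then (st.1, st.2.1, pl, st.2.2.2)
  else if PySem.Chars.startswith pl ['4', '.'] then (st.1, st.2.1, st.2.2.1, pl)
  else st

def plan_output_warp (plans : String) : String :=
  let ls := PySem.Chars.splitOn plans.toList ['\n']
  let st := ls.foldl pvStepA ([], [], [], [])
  String.ofList ("Plan:\n".toList ++ st.1 ++ st.2.1 ++ st.2.2.1 ++ st.2.2.2)

-- ===== PORT B =====
-- B's per-prefix scan: the last line starting with p, or '' if none ('matches[-1] if matches else ""').
def pvLastMatch (p : List Char) (lines : List (List Char)) : List Char :=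
  match (lines.filter (fun l => PySem.Chars.startswith l p)).getLast? with
  | some l => l
  | none => []

def plan_output_warp_alt (plans : String) : String :=
  let lines := (PySem.Chars.splitOn plans.toList ['\n']).map (fun l => l ++ ['\n'])
  String.ofList ([['1', '.'], ['2', '.'], ['3', '.'], ['4', '.']].foldl
    (fun out p => out ++ pvLastMatch p lines) "Plan:\n".toList)

-- ===== PRECONDITION & SPEC =====
def Spec_plan_output_warp (plans : String) (out : String) : Prop := out = plan_output_warp_alt plans
instance (plans : String) (out : String) : Decidable (Spec_plan_output_warp plans out) := by unfold Spec_plan_output_warp; infer_instance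

-- ===== CLAIM (what is proved, stated in full; the proofs are below) =====
def Claim_equal_plan_output_warp : Prop := ∀ (plans : String), Dom_plan_output_warp plans → Spec_plan_output_warp plans (plan_output_warp plans)

-- ===== LEMMAS AND PROOFS =====

-- splitOn's worker never lets the (single-char) separator into a piece.
theorem pv_go_no_sep (c0 : Char) (fuel : Nat) : ∀ (l cur : List Char) (acc : List (List Char)),
    l.length < fuel → c0 ∉ cur → (∀ p ∈ acc, c0 ∉ p) →
    ∀ p ∈ PySem.Chars.splitOn.go [c0] fuel l cur acc, c0 ∉ p := by
  induction fuel with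
  | zero => intro l cur acc h; omega
  | succ fuel ih =>
    intro l cur acc hf hcur hacc p hp
    match l with
    | [] =>
      simp [PySem.Chars.splitOn.go] at hp
      rcases hp with h | h
      · exact hacc p h
      · subst h; simpa using hcur
    | c :: rest =>
      rw [PySem.Chars.splitOn.go] at hp
      by_cases hc : c0 = c
      · subst hc
        simp [List.isPrefixOf] at hp
        exact ih _ _ _ (by simp at hf ⊢; omega) (by simp)
          (by intro q hq; rcases List.mem_cons.mp hq with h | h
              · subst h; simpa using hcur
              · exact hacc q h) p hp
      · simp [List.isPrefixOf, hc] at hp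
        exact ih _ _ _ (by simp at hf ⊢; omega)
          (by intro h; rcases List.mem_cons.mp h with h | h; exact hc h; exact hcur h)
          hacc p hp

theorem pv_splitOn_no_sep (c0 : Char) (s : List Char) :
    ∀ p ∈ PySem.Chars.splitOn s [c0], c0 ∉ p := by
  unfold PySem.Chars.splitOn
  exact pv_go_no_sep c0 (s.length + 1) s [] [] (by omega) (by simp) (by simp)

-- B's per-prefix "last match or init" as a left-to-right recurrence over the raw pieces.
def pvF (p : List Char) (ls : List (List Char)) (init : List Char) : List Char :=
  match ((ls.map (fun l => l ++ ['\n'])).filter (fun l => PySem.Chars.startswith l p)).getLast? with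
  | some l => l
  | none => init

theorem pvF_nil (p : List Char) (init : List Char) : pvF p [] init = init := rfl

theorem pvF_cons (p l : List Char) (ls : List (List Char)) (init : List Char) :
    pvF p (l :: ls) init
      = pvF p ls (if PySem.Chars.startswith (l ++ ['\n']) p then l ++ ['\n'] else init) := by
  unfold pvF
  by_cases h : PySem.Chars.startswith (l ++ ['\n']) p
  · simp only [List.map_cons, List.filter_cons, h, if_pos, List.getLast?_cons]
    cases hl : ((ls.map (fun l => l ++ ['\n'])).filter (fun l => PySem.Chars.startswith l p)).getLast? with
    | none => simp
    | some l' => simp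
  · simp only [List.map_cons, List.filter_cons, h]
    simp

-- two distinct leading digits cannot both be prefixes
theorem pv_excl {pl : List Char} {c c' : Char} (h : PySem.Chars.startswith pl [c, '.'] = true)
    (hne : c' ≠ c) : PySem.Chars.startswith pl [c', '.'] = false := by
  rw [PySem.Chars.startswith_iff] at h
  obtain ⟨t, rfl⟩ := h
  rw [← Bool.not_eq_true, PySem.Chars.startswith_iff]
  intro h'
  rcases List.cons_prefix_cons.mp h' with ⟨heq, -⟩
  exact hne heq

theorem pv_no_nl_endswith {l : List Char} (h : '\n' ∉ l) :
    PySem.Chars.endswith l ['\n'] = false := by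
  rw [← Bool.not_eq_true, PySem.Chars.endswith_iff]
  intro hs
  exact h (hs.subset (by simp))

-- the main invariant: A's fold computes B's four per-prefix last matches
theorem pv_fold_eq (ls : List (List Char)) (hn : ∀ l ∈ ls, '\n' ∉ l) :
    ∀ a b c d, ls.foldl pvStepA (a, b, c, d)
      = (pvF ['1', '.'] ls a, pvF ['2', '.'] ls b, pvF ['3', '.'] ls c, pvF ['4', '.'] ls d) := by
  induction ls with
  | nil => intro a b c d; simp [pvF_nil]
  | cons l ls ih =>
    intro a b c d
    have hnl : '\n' ∉ l := hn l (by simp)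
    have hrest : ∀ l ∈ ls, '\n' ∉ l := fun x hx => hn x (by simp [hx])
    have hend := pv_no_nl_endswith hnl
    simp only [List.foldl_cons, pvF_cons]
    rw [show pvStepA (a, b, c, d) l
        = (if PySem.Chars.startswith (l ++ ['\n']) ['1', '.'] then l ++ ['\n'] else a,
           if PySem.Chars.startswith (l ++ ['\n']) ['2', '.'] then l ++ ['\n'] else b,
           if PySem.Chars.startswith (l ++ ['\n']) ['3', '.'] then l ++ ['\n'] else c,
           if PySem.Chars.startswith (l ++ ['\n']) ['4', '.'] then l ++ ['\n'] else d) from ?_]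
    · exact ih hrest _ _ _ _
    · unfold pvStepA
      simp only [hend, Bool.false_eq_true, if_false]
      by_cases h1 : PySem.Chars.startswith (l ++ ['\n']) ['1', '.']
      · simp [h1, pv_excl h1 (by decide : ('2':Char) ≠ '1'), pv_excl h1 (by decide : ('3':Char) ≠ '1'),
              pv_excl h1 (by decide : ('4':Char) ≠ '1')]
      · by_cases h2 : PySem.Chars.startswith (l ++ ['\n']) ['2', '.']
        · simp [h1, h2, pv_excl h2 (by decide : ('3':Char) ≠ '2'),
                pv_excl h2 (by decide : ('4':Char) ≠ '2')]
        · by_cases h3 : PySem.Chars.startswith (l ++ ['\n']) ['3', '.']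
          · simp [h1, h2, h3, pv_excl h3 (by decide : ('4':Char) ≠ '3')]
          · by_cases h4 : PySem.Chars.startswith (l ++ ['\n']) ['4', '.'] <;>
              simp [h1, h2, h3, h4]

theorem pvLastMatch_eq_pvF (p : List Char) (ls : List (List Char)) :
    pvLastMatch p (ls.map (fun l => l ++ ['\n'])) = pvF p ls [] := rfl

-- ===== VERDICT (by name: the statement is the Claim_ definition above) =====
theorem plan_output_warp_spec : Claim_equal_plan_output_warp := by
  intro plans _
  unfold Spec_plan_output_warp
  dsimp only [plan_output_warp, plan_output_warp_alt]
  rw [pv_fold_eq _ (pv_splitOn_no_sep '\n' plans.toList)]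
  simp only [List.foldl_cons, List.foldl_nil, pvLastMatch_eq_pvF]
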